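-- pv_equiv track=rewrite | github.com/lziyii/homework | week2/2.1.py | find_max_list
-- ===== SOURCE A (Python) =====
-- def find_max_list(n):
--     a = n % 3
--     b = n//3
--     result = []
--     if a == 0:
--         for i in range(b):
--             result.append(3)
--     elif a == 1:
--         result.append(2)
--         result.append(2)
--         for i in range(b - 1):
--             result.append(3)
--     else:
--         result.append(2)
--         for i in range(b):
--             result.append(3)
--     return result
-- ===== SOURCE B (Python) =====
-- def find_max_list(n):
--     tail = []
--     while n >= 5:
--         n -= 3
--         tail.append(3)
--     head = [3] if n == 3 else ([], [2, 2], [2])[n % 3]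
--     return head + tail
-- ===== Notes on version B (the rewrite author's own statement) =====
-- stated objective: alternative
-- what changed: Replaced the residue case-analysis with per-branch append loops by a greedy loop that repeatedly peels off a 3 while n >= 5 and then looks up the small remainder in a base-case table.
import Mathlib
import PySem

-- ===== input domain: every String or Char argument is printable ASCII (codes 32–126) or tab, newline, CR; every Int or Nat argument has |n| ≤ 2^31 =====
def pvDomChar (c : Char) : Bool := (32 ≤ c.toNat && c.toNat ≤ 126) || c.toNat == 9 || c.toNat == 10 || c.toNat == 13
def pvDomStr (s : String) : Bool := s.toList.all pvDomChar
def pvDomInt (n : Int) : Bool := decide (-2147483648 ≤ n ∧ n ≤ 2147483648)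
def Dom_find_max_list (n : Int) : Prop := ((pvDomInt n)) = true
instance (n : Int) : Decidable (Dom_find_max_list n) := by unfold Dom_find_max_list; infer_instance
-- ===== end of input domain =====

-- B replaces A's residue case-analysis and append loops by a greedy peel-a-3 loop with a base-case table (alternative algorithm; return value only).


-- ===== PORT A =====
def find_max_list (n : Int) : List Int :=
  let a := PySem.Int.mod n 3
  let b := PySem.Int.floordiv n 3
  let result : List Int := []
  if a == 0 then
    (PySem.List.pyRange 0 b 1).foldl (fun acc _ => acc ++ [3]) result
  else if a == 1 then
    (PySem.List.pyRange 0 (b - 1) 1).foldl (fun acc _ => acc ++ [3]) ((result ++ [2]) ++ [2])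
  else
    (PySem.List.pyRange 0 b 1).foldl (fun acc _ => acc ++ [3]) (result ++ [2])

-- ===== PORT B =====
-- the 'while n >= 5' loop of Source B: peel a 3 per iteration, appending it to tail
def fmlLoop (n : Int) (tail : List Int) : Int × List Int :=
  if n ≥ 5 then fmlLoop (n - 3) (tail ++ [3]) else (n, tail)
termination_by n.toNat
decreasing_by omega

def find_max_list_alt (n : Int) : List Int :=
  let r := fmlLoop n []
  let m := r.1
  let tail := r.2
  -- the tuple lookup ([], [2, 2], [2])[n % 3] ported as a three-way if on the residue
  let head : List Int :=
    if m == 3 then [3]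
    else if PySem.Int.mod m 3 == 0 then []
    else if PySem.Int.mod m 3 == 1 then [2, 2]
    else [2]
  head ++ tail

-- ===== PRECONDITION & SPEC =====
def Spec_find_max_list (n : Int) (out : List Int) : Prop := out = find_max_list_alt n
instance (n : Int) (out : List Int) : Decidable (Spec_find_max_list n out) := by unfold Spec_find_max_list; infer_instance

-- ===== CLAIM (what is proved, stated in full; the proofs are below) =====
def Claim_equal_find_max_list : Prop := ∀ (n : Int), Dom_find_max_list n → Spec_find_max_list n (find_max_list n)

-- ===== LEMMAS AND PROOFS =====

/-- Number of iterations of Source B's while loop. -/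
def fmlSteps (n : Int) : Nat := if n ≥ 5 then ((n - 2) / 3).toNat else 0

theorem fmlLoop_eq (n : Int) (tail : List Int) :
    fmlLoop n tail = (n - 3 * (fmlSteps n : Int), tail ++ List.replicate (fmlSteps n) 3) := by
  fun_induction fmlLoop n tail with
  | case1 n tail h ih =>
      have h1 : fmlSteps n = fmlSteps (n - 3) + 1 := by
        unfold fmlSteps; split <;> split <;> omega
      rw [ih, h1]
      simp only [Prod.mk.injEq]
      refine ⟨by push_cast; ring, ?_⟩
      simp [List.replicate_succ, List.append_assoc]
  | case2 n tail h =>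
      have h0 : fmlSteps n = 0 := by unfold fmlSteps; split <;> omega
      simp [h0]

/-- A's append loop over any index list just appends that many 3s. -/
theorem foldl_append_threes (l : List Int) (init : List Int) :
    l.foldl (fun acc _ => acc ++ [3]) init = init ++ List.replicate l.length 3 := by
  induction l generalizing init with
  | nil => simp
  | cons x xs ih => simp [List.foldl, ih, List.replicate_succ, List.append_assoc]

-- ===== VERDICT (by name: the statement is the Claim_ definition above) =====
theorem find_max_list_spec : Claim_equal_find_max_list := by
  intro n _
  show find_max_list n = find_max_list_alt n
  have hm : ∀ a : Int, PySem.Int.mod a 3 = a % 3 :=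
    fun a => PySem.Int.mod_eq_emod_of_pos (by norm_num)
  have hd : ∀ a : Int, PySem.Int.floordiv a 3 = a / 3 :=
    fun a => PySem.Int.floordiv_eq_ediv_of_pos (by norm_num)
  have hkv : (fmlSteps n : Int) = if n ≥ 5 then (n - 2) / 3 else 0 := by
    unfold fmlSteps; split <;> simp <;> omega
  simp only [find_max_list, find_max_list_alt, fmlLoop_eq, hm, hd,
    foldl_append_threes, PySem.List.length_pyRange_one, beq_iff_eq]
  generalize hgen : fmlSteps n = k at hkv
  have hr : n % 3 = 0 ∨ n % 3 = 1 ∨ n % 3 = 2 := by omega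
  rcases hr with h | h | h <;> by_cases h5 : n ≥ 5
  · -- n % 3 = 0, n ≥ 5 (so n ≥ 6): the loop stops at 3
    rw [if_pos h5] at hkv
    rw [if_pos h, show n - 3 * (k : Int) = 3 by omega, if_pos rfl]
    have hc : (n / 3 - 0).toNat = k + 1 := by omega
    rw [hc, List.replicate_succ]
    simp
  · -- n % 3 = 0, n < 5: the loop does not run
    rw [if_neg h5] at hkv
    rw [if_pos h, show n - 3 * (k : Int) = n by omega]
    by_cases h3 : n = 3
    · subst h3
      rw [if_pos rfl]
      simp [show k = 0 by omega]
    · rw [if_neg h3, if_pos h]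
      simp [show k = 0 by omega] <;> omega
  · -- n % 3 = 1, n ≥ 5 (so n ≥ 7): the loop stops at 4
    rw [if_pos h5] at hkv
    rw [if_neg (by omega), if_pos h, show n - 3 * (k : Int) = 4 by omega]
    rw [if_neg (by norm_num), if_neg (by decide), if_pos (by decide)]
    simp <;> omega
  · -- n % 3 = 1, n < 5: the loop does not run
    rw [if_neg h5] at hkv
    rw [if_neg (by omega), if_pos h, show n - 3 * (k : Int) = n by omega]
    rw [if_neg (by omega), if_neg (by omega), if_pos h]
    simp [show k = 0 by omega] <;> omega
  · -- n % 3 = 2, n ≥ 5: the loop stops at 2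
    rw [if_pos h5] at hkv
    rw [if_neg (by omega), if_neg (by omega), show n - 3 * (k : Int) = 2 by omega]
    rw [if_neg (by norm_num), if_neg (by decide), if_neg (by decide)]
    simp <;> omega
  · -- n % 3 = 2, n < 5: the loop does not run
    rw [if_neg h5] at hkv
    rw [if_neg (by omega), if_neg (by omega), show n - 3 * (k : Int) = n by omega]
    rw [if_neg (by omega), if_neg (by omega), if_neg (by omega)]
    simp [show k = 0 by omega] <;> omega
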